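-- pv_equiv track=rewrite | github.com/ntinosk-mtf/etfa2018 | MTF-Storm_python3_v1/MTF-Storm/basetest/test_field_PDU.py | is_valid_combination_f43
-- ===== SOURCE A (Python) =====
-- def is_valid_combination_f43( values, names,start_address=None,max_address=None):
--
--     """
--     FC43  PAIRWISE test
--     Read Device ID code                     Object Name
--     DeviceInformation_Basic:  0x01,         range [0x00 -0x02]
--     DeviceInformation_Regular= 0x02 ,       range [0x03 -0x7F]
--     DeviceInformation_Extended= 0x03 ,      range [0x80–0xFF]
--     DeviceInformation_Specific= 0x04 ,
--      ------------------------"Contr." ..rules-----#excludes them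
--      lambda d: 1 == d["Read Dev Id code"]!=1 --single test
--     ,lambda d: 2 == d["Read Dev Id code"] and d[3<="Object_Id"<129]
--     ,lambda d: 3 == d["Read Dev Id code"] and d[128<"Object_Id"<256]
--
--     """
--     dictionary = dict( list(zip( names, values )) )
--
--     rules = [
--             lambda d: 1 == d["Read Dev Id code"] and 0<=d["Object_Id"]<3
--             ,lambda d: 2 == d["Read Dev Id code"] and 3<=d["Object_Id"]<129
--             ,lambda d: 3 == d["Read Dev Id code"] and 128<d["Object_Id"]<256
--
--             ]
--
--     for rule in rules:
--         try:
--             if rule(dictionary):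
--                 return False
--         except KeyError: pass
--     return True
-- ===== SOURCE B (Python) =====
-- def is_valid_combination_f43(values, names, start_address=None, max_address=None):
--     d = dict(zip(names, values))
--     try:
--         code = d["Read Dev Id code"]
--     except KeyError:
--         return True
--     if code not in (1, 2, 3):
--         return True
--     try:
--         obj = d["Object_Id"]
--     except KeyError:
--         return True
--     if code == 1:
--         return not (0 <= obj < 3)
--     if code == 2:
--         return not (3 <= obj < 129)
--     return not (128 < obj < 256)
-- ===== Notes on version B (the rewrite author's own statement) =====
-- stated objective: simpler
-- what changed: Replaces A's loop over a list of lambda rules with per-rule try/except by a single guarded lookup of the device-id code and one direct branch per code value.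
import Mathlib
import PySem

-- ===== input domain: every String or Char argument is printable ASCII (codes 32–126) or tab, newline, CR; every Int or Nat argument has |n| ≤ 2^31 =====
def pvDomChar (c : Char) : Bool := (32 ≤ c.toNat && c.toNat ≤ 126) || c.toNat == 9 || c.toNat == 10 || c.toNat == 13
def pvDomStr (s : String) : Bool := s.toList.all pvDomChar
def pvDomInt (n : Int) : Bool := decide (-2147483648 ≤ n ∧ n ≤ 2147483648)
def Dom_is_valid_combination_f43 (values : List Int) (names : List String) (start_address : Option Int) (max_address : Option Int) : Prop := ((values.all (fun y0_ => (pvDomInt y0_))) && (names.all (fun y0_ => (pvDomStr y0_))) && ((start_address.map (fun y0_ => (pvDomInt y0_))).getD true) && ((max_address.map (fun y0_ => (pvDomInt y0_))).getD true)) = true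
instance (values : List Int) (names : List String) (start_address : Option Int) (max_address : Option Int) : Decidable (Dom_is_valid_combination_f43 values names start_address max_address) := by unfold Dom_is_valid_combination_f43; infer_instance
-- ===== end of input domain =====

-- B replaces A's loop over lambda rules (each wrapped in try/except KeyError) by one
-- guarded code lookup and a single branch per code value; objective: simpler.

-- ===== PORT A =====
-- a rule evaluates to `none` on KeyError, `some b` otherwise (Python's short-circuit `and`)
def pvRule1 (d : PySem.Dict String Int) : Option Bool :=
  match PySem.Dict.get? d "Read Dev Id code" with
  | none => none
  | some c =>
    if 1 == c then
      match PySem.Dict.get? d "Object_Id" with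
      | none => none
      | some o => some (decide (0 ≤ o ∧ o < 3))
    else some false

def pvRule2 (d : PySem.Dict String Int) : Option Bool :=
  match PySem.Dict.get? d "Read Dev Id code" with
  | none => none
  | some c =>
    if 2 == c then
      match PySem.Dict.get? d "Object_Id" with
      | none => none
      | some o => some (decide (3 ≤ o ∧ o < 129))
    else some false

def pvRule3 (d : PySem.Dict String Int) : Option Bool :=
  match PySem.Dict.get? d "Read Dev Id code" with
  | none => none
  | some c =>
    if 3 == c then
      match PySem.Dict.get? d "Object_Id" with
      | none => none
      | some o => some (decide (128 < o ∧ o < 256))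
    else some false

-- `for rule in rules: try: if rule(d): return False; except KeyError: pass` then `return True`
def pvRuleLoop (rules : List (PySem.Dict String Int → Option Bool)) (d : PySem.Dict String Int) : Bool :=
  match rules with
  | [] => true
  | r :: rs =>
    match r d with
    | some true => false
    | _ => pvRuleLoop rs d

def is_valid_combination_f43 (values : List Int) (names : List String) (_start_address : Option Int) (_max_address : Option Int) : Bool :=
  pvRuleLoop [pvRule1, pvRule2, pvRule3] (PySem.Dict.ofList (names.zip values))

-- ===== PORT B =====
def is_valid_combination_f43_alt (values : List Int) (names : List String) (_start_address : Option Int) (_max_address : Option Int) : Bool :=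
  let d := PySem.Dict.ofList (names.zip values)
  match PySem.Dict.get? d "Read Dev Id code" with
  | none => true                                           -- except KeyError: return True
  | some code =>
    if ¬ (code = 1 ∨ code = 2 ∨ code = 3) then true        -- code not in (1,2,3)
    else
      match PySem.Dict.get? d "Object_Id" with
      | none => true                                       -- except KeyError: return True
      | some obj =>
        if code = 1 then !(decide (0 ≤ obj ∧ obj < 3))
        else if code = 2 then !(decide (3 ≤ obj ∧ obj < 129))
        else !(decide (128 < obj ∧ obj < 256))

-- ===== PRECONDITION & SPEC =====
def Spec_is_valid_combination_f43 (values : List Int) (names : List String) (start_address : Option Int) (max_address : Option Int) (out : Bool) : Prop := out = is_valid_combination_f43_alt values names start_address max_address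
instance (values : List Int) (names : List String) (start_address : Option Int) (max_address : Option Int) (out : Bool) : Decidable (Spec_is_valid_combination_f43 values names start_address max_address out) := by unfold Spec_is_valid_combination_f43; infer_instance

-- ===== CLAIM (what is proved, stated in full; the proofs are below) =====
def Claim_equal_is_valid_combination_f43 : Prop := ∀ (values : List Int) (names : List String) (start_address : Option Int) (max_address : Option Int), Dom_is_valid_combination_f43 values names start_address max_address → Spec_is_valid_combination_f43 values names start_address max_address (is_valid_combination_f43 values names start_address max_address)

-- ===== LEMMAS AND PROOFS =====
theorem pv_core_eq (d : PySem.Dict String Int) :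
    pvRuleLoop [pvRule1, pvRule2, pvRule3] d =
      (match PySem.Dict.get? d "Read Dev Id code" with
       | none => true
       | some code =>
         if ¬ (code = 1 ∨ code = 2 ∨ code = 3) then true
         else
           match PySem.Dict.get? d "Object_Id" with
           | none => true
           | some obj =>
             if code = 1 then !(decide (0 ≤ obj ∧ obj < 3))
             else if code = 2 then !(decide (3 ≤ obj ∧ obj < 129))
             else !(decide (128 < obj ∧ obj < 256))) := by
  rcases hc : PySem.Dict.get? d "Read Dev Id code" with _ | c <;>
  rcases ho : PySem.Dict.get? d "Object_Id" with _ | o <;>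
  simp only [pvRuleLoop, pvRule1, pvRule2, pvRule3, hc, ho] <;>
  by_cases h1 : c = 1 <;> by_cases h2 : c = 2 <;> by_cases h3 : c = 3 <;>
  simp_all <;>
  first
  | (rw [← Bool.not_and]; generalize (_ && _ : Bool) = b; cases b <;> rfl)
  | (rw [if_neg (by omega), if_neg (by omega), if_neg (by omega)])

-- ===== VERDICT (by name: the statement is the Claim_ definition above) =====
theorem is_valid_combination_f43_spec : Claim_equal_is_valid_combination_f43 := by
  intro values names start_address max_address _
  unfold Spec_is_valid_combination_f43 is_valid_combination_f43 is_valid_combination_f43_alt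
  exact pv_core_eq _
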